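-- pv_equiv track=rewrite | github.com/JoshH28/CP_cpp | ABCs/ABC 365/lol.py | total_xor_sum
-- ===== SOURCE A (Python) =====
-- def total_xor_sum(arr):
--     n = len(arr)
--     total_sum = 0
--     # Iterate through each element
--     for i in range(n):
--         # Compute the number of subarrays including arr[i]
--         left = i + 1  # Subarrays that can start at or before i
--         right = n - i  # Subarrays that can end at or after i
--         # If a number is included in an odd number of subarrays in XOR summation, it contributes to the final XOR
--         if (left * right) % 2 == 1:
--             total_sum ^= arr[i]
--     return total_sum
-- ===== SOURCE B (Python) =====
-- def total_xor_sum(arr):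
--     n = len(arr)
--     total = 0
--     for i in range(n):
--         x = 0
--         for j in range(i, n):
--             x ^= arr[j]
--             total ^= x
--     return total
-- ===== Notes on version B (the rewrite author's own statement) =====
-- stated objective: alternative
-- what changed: B computes the answer by its definition, enumerating every subarray and XOR-ing each subarray's running XOR into the total with two nested loops, instead of A's single pass that uses the parity of the (i+1)*(n-i) occurrence count of each element.
import Mathlib
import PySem

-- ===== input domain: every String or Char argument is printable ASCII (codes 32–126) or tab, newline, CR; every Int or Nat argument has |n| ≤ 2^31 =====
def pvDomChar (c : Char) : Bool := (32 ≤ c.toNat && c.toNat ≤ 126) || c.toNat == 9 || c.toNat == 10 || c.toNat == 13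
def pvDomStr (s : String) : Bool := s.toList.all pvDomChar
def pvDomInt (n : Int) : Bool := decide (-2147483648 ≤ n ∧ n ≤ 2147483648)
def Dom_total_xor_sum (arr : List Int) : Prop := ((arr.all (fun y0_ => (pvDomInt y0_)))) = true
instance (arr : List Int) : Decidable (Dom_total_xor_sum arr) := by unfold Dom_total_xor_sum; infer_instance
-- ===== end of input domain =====

-- B replaces A's O(n) parity shortcut by the definition itself: two nested loops that
-- enumerate every subarray, maintain its running XOR, and fold all of them into the total
-- (objective: alternative decomposition, not speed).

-- ===== PORT A =====
def total_xor_sum (arr : List Int) : Int :=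
  let n : Int := arr.length
  (PySem.List.pyRange 0 n 1).foldl
    (fun total_sum i =>
      let left := i + 1
      let right := n - i
      if PySem.Int.mod (left * right) 2 = 1 then
        PySem.Int.bxor total_sum (PySem.List.pyGetD arr i 0)
      else total_sum) 0

-- ===== PORT B =====
def total_xor_sum_alt (arr : List Int) : Int :=
  let n : Int := arr.length
  (PySem.List.pyRange 0 n 1).foldl
    (fun total i =>
      ((PySem.List.pyRange i n 1).foldl
        (fun (p : Int × Int) j =>
          let x := PySem.Int.bxor p.1 (PySem.List.pyGetD arr j 0)
          (x, PySem.Int.bxor p.2 x)) (0, total)).2) 0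

-- ===== PRECONDITION & SPEC =====
def Spec_total_xor_sum (arr : List Int) (out : Int) : Prop := out = total_xor_sum_alt arr
instance (arr : List Int) (out : Int) : Decidable (Spec_total_xor_sum arr out) := by unfold Spec_total_xor_sum; infer_instance

-- ===== CLAIM (what is proved, stated in full; the proofs are below) =====
def Claim_equal_total_xor_sum : Prop := ∀ (arr : List Int), Dom_total_xor_sum arr → Spec_total_xor_sum arr (total_xor_sum arr)

-- ===== LEMMAS AND PROOFS =====

-- XOR algebra for PySem.Int.bxor (assoc and cancellation are not in the prelude's book).
-- Encode an Int as (sign, magnitude-or-complement); bxor is componentwise XOR there.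
def pvDec (s : Bool) (m : Nat) : Int := if s then -(m : Nat) - 1 else (m : Nat)

theorem pv_bxor_dec (a b : Int) :
    PySem.Int.bxor a b =
      pvDec (xor (decide (a < 0)) (decide (b < 0)))
        ((if 0 ≤ a then a.toNat else (-a - 1).toNat) ^^^ (if 0 ≤ b then b.toNat else (-b - 1).toNat)) := by
  unfold PySem.Int.bxor pvDec
  by_cases ha : 0 ≤ a <;> by_cases hb : 0 ≤ b <;>
    simp [ha, hb, show a < 0 ↔ ¬ 0 ≤ a from by omega, show b < 0 ↔ ¬ 0 ≤ b from by omega]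

theorem pv_dec_lt_decide (s : Bool) (m : Nat) : decide (pvDec s m < 0) = s := by
  cases s <;> simp [pvDec] <;> omega

theorem pv_dec_mag (s : Bool) (m : Nat) :
    (if 0 ≤ pvDec s m then (pvDec s m).toNat else (-(pvDec s m) - 1).toNat) = m := by
  cases s <;> simp [pvDec] <;> omega

theorem pv_bxor_assoc (a b c : Int) :
    PySem.Int.bxor (PySem.Int.bxor a b) c = PySem.Int.bxor a (PySem.Int.bxor b c) := by
  rw [pv_bxor_dec a b, pv_bxor_dec b c,
      pv_bxor_dec (pvDec _ _) c, pv_bxor_dec a (pvDec _ _),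
      pv_dec_lt_decide, pv_dec_lt_decide, pv_dec_mag, pv_dec_mag,
      Bool.xor_assoc, Nat.xor_assoc]

theorem pv_zero_bxor (a : Int) : PySem.Int.bxor 0 a = a := by
  rw [PySem.Int.bxor_comm]; exact PySem.Int.bxor_zero a

-- even-index XOR / odd-index XOR of a list
def pvEO : List Int → Int × Int
  | [] => (0, 0)
  | a :: t => (PySem.Int.bxor a (pvEO t).2, (pvEO t).1)

-- both programs compute this value
def pvSpecVal (l : List Int) : Int := if l.length % 2 = 1 then (pvEO l).1 else 0

-- ---------- A side ----------

theorem pv_cond_iff (n i : Int) (h0 : 0 ≤ i) (h1 : i < n) :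
    (PySem.Int.mod ((i + 1) * (n - i)) 2 = 1) ↔ (n % 2 = 1 ∧ i % 2 = 0) := by
  rw [PySem.Int.mod_eq_emod_of_pos (by norm_num)]
  rw [Int.mul_emod]
  rcases Int.emod_two_eq i with hi | hi <;> rcases Int.emod_two_eq n with hn | hn <;>
  · rw [show (i + 1) % 2 = (if i % 2 = 0 then 1 else 0) by omega,
        show (n - i) % 2 = (if (n - i) % 2 = 0 then 0 else 1) by omega]
    simp [hi, hn] <;> omega

-- fold of an index-conditional XOR, as a recursion on the remaining suffix
def pvG (c : Int → Bool) : Int → List Int → Int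
  | _, [] => 0
  | s, a :: u => PySem.Int.bxor (if c s then a else 0) (pvG c (s + 1) u)

theorem pv_foldA (l : List Int) (c : Int → Bool) :
    ∀ (u : List Int) (s t : Int), 0 ≤ s → u = l.drop s.toNat →
      (PySem.List.pyRange s (l.length : Int) 1).foldl
        (fun t i => if c i then PySem.Int.bxor t (PySem.List.pyGetD l i 0) else t) t
      = PySem.Int.bxor t (pvG c s u) := by
  intro u
  induction u with
  | nil =>
    intro s t hs hu
    have hlen : (l.length : Int) ≤ s := by
      have := congrArg List.length hu
      simp [List.length_drop] at this
      omega
    rw [PySem.List.pyRange_one_eq_nil hlen]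
    simp [pvG, PySem.Int.bxor_zero]
  | cons a u' ih =>
    intro s t hs hu
    have hlt : s.toNat < l.length := by
      by_contra h
      rw [List.drop_eq_nil_of_le (by omega)] at hu
      simp at hu
    have hslt : s < (l.length : Int) := by omega
    have hget : l[s.toNat] = a := by
      rw [← List.getElem_cons_drop hlt] at hu
      exact (List.cons.injEq _ _ _ _ ▸ hu).1.symm
    have hu' : u' = l.drop (s + 1).toNat := by
      rw [← List.getElem_cons_drop hlt] at hu
      have := (List.cons.injEq _ _ _ _ ▸ hu).2
      rw [this]
      congr 1
      omega
    rw [PySem.List.pyRange_one_cons hslt, List.foldl_cons,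
        ih (s + 1) _ (by omega) hu']
    have hgd : PySem.List.pyGetD l s 0 = a := by
      rw [PySem.List.pyGetD_eq_getElem l 0 hs hslt, hget]
    by_cases hc : c s = true
    · simp only [hc, if_true, hgd, pvG, pv_bxor_assoc]
    · simp only [Bool.eq_false_iff.mpr hc, Bool.false_eq_true, if_false, pvG, pv_zero_bxor]

theorem pv_G_even (c : Int → Bool) (hc : ∀ i, c i = false) :
    ∀ (l : List Int) (s : Int), pvG c s l = 0 := by
  intro l; induction l with
  | nil => intro s; rfl
  | cons a u ih => intro s; simp [pvG, hc, ih]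

theorem pv_G_odd (c : Int → Bool) (hc : ∀ i, c i = decide (i % 2 = 0)) :
    ∀ (l : List Int) (s : Int),
      pvG c s l = if s % 2 = 0 then (pvEO l).1 else (pvEO l).2 := by
  intro l; induction l with
  | nil => intro s; simp [pvG, pvEO]
  | cons a u ih =>
    intro s
    have hs1 : (s + 1) % 2 = if s % 2 = 0 then 1 else 0 := by omega
    by_cases hs : s % 2 = 0
    · simp [pvG, hc, hs, ih (s + 1), hs1, pvEO]
    · simp [pvG, hc, hs, ih (s + 1), hs1, pvEO, pv_zero_bxor]

theorem pv_A_char (l : List Int) : total_xor_sum l = pvSpecVal l := by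
  rw [show total_xor_sum l
      = (PySem.List.pyRange 0 (l.length : Int) 1).foldl
          (fun total_sum i =>
            if PySem.Int.mod ((i + 1) * ((l.length : Int) - i)) 2 = 1 then
              PySem.Int.bxor total_sum (PySem.List.pyGetD l i 0)
            else total_sum) 0 from rfl]
  rw [PySem.List.foldl_congr_mem (PySem.List.pyRange 0 (l.length : Int) 1)
    (fun total_sum i =>
      if PySem.Int.mod ((i + 1) * ((l.length : Int) - i)) 2 = 1 then
        PySem.Int.bxor total_sum (PySem.List.pyGetD l i 0)
      else total_sum)
    (fun t i =>
      if (fun i => decide ((l.length : Int) % 2 = 1 ∧ i % 2 = 0)) i = true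
      then PySem.Int.bxor t (PySem.List.pyGetD l i 0) else t)
    0
    (by
      intro acc x hx
      rw [PySem.List.mem_pyRange_one] at hx
      simp only [decide_eq_true_eq]
      exact if_congr (pv_cond_iff (l.length : Int) x hx.1 hx.2) rfl rfl)]
  rw [pv_foldA l (fun i => decide ((l.length : Int) % 2 = 1 ∧ i % 2 = 0)) l 0 0 le_rfl
      (by simp)]
  rw [pv_zero_bxor]
  unfold pvSpecVal
  by_cases hn : (l.length : Int) % 2 = 1
  · rw [pv_G_odd _ (by intro i; simp [hn]) l 0]
    simp
    omega
  · rw [pv_G_even _ (by intro i; simp [hn]) l 0]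
    omega

-- ---------- B side ----------

-- running-prefix XOR sum of the inner loop, seeded with x
def pvS : Int → List Int → Int
  | _, [] => 0
  | x, a :: u => PySem.Int.bxor (PySem.Int.bxor x a) (pvS (PySem.Int.bxor x a) u)

-- the inner loop of B over range(i, n), as a recursion on the suffix it reads
theorem pv_innerB (l : List Int) :
    ∀ (u : List Int) (s x t : Int), 0 ≤ s → u = l.drop s.toNat →
      ((PySem.List.pyRange s (l.length : Int) 1).foldl
        (fun (p : Int × Int) j =>
          (PySem.Int.bxor p.1 (PySem.List.pyGetD l j 0),
           PySem.Int.bxor p.2 (PySem.Int.bxor p.1 (PySem.List.pyGetD l j 0)))) (x, t)).2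
      = PySem.Int.bxor t (pvS x u) := by
  intro u
  induction u with
  | nil =>
    intro s x t hs hu
    have hlen : (l.length : Int) ≤ s := by
      have := congrArg List.length hu
      simp [List.length_drop] at this
      omega
    rw [PySem.List.pyRange_one_eq_nil hlen]
    simp [pvS, PySem.Int.bxor_zero]
  | cons a u' ih =>
    intro s x t hs hu
    have hlt : s.toNat < l.length := by
      by_contra h
      rw [List.drop_eq_nil_of_le (by omega)] at hu
      simp at hu
    have hslt : s < (l.length : Int) := by omega
    have hget : l[s.toNat] = a := by
      rw [← List.getElem_cons_drop hlt] at hu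
      exact (List.cons.injEq _ _ _ _ ▸ hu).1.symm
    have hu' : u' = l.drop (s + 1).toNat := by
      rw [← List.getElem_cons_drop hlt] at hu
      have := (List.cons.injEq _ _ _ _ ▸ hu).2
      rw [this]
      congr 1
      omega
    have hgd : PySem.List.pyGetD l s 0 = a := by
      rw [PySem.List.pyGetD_eq_getElem l 0 hs hslt, hget]
    rw [PySem.List.pyRange_one_cons hslt, List.foldl_cons]
    simp only [hgd]
    rw [ih (s + 1) (PySem.Int.bxor x a) _ (by omega) hu']
    simp only [pvS, pv_bxor_assoc]

theorem pv_S_shift (l : List Int) :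
    ∀ (x : Int),
      pvS x l = PySem.Int.bxor (if l.length % 2 = 1 then x else 0) (pvS 0 l) := by
  induction l with
  | nil => intro x; simp [pvS, PySem.Int.bxor_zero]
  | cons a u ih =>
    intro x
    rw [show pvS x (a :: u) = PySem.Int.bxor (PySem.Int.bxor x a) (pvS (PySem.Int.bxor x a) u) from rfl,
        ih (PySem.Int.bxor x a),
        show pvS 0 (a :: u) = PySem.Int.bxor (PySem.Int.bxor 0 a) (pvS (PySem.Int.bxor 0 a) u) from rfl,
        pv_zero_bxor, ih a]
    by_cases hu : u.length % 2 = 1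
    · have : (a :: u).length % 2 = 1 ↔ False := by simp [List.length_cons]; omega
      simp only [if_pos hu, this, if_false, ← pv_bxor_assoc, PySem.Int.bxor_self, pv_zero_bxor]
    · have : (a :: u).length % 2 = 1 ↔ True := by simp [List.length_cons]; omega
      simp only [if_neg hu, this, if_true, pv_zero_bxor, ← pv_bxor_assoc]

theorem pv_S_EO (l : List Int) :
    pvS 0 l = if l.length % 2 = 1 then (pvEO l).1 else (pvEO l).2 := by
  induction l with
  | nil => simp [pvS, pvEO]
  | cons a u ih =>
    rw [show pvS 0 (a :: u) = PySem.Int.bxor (PySem.Int.bxor 0 a) (pvS (PySem.Int.bxor 0 a) u) from rfl,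
        pv_zero_bxor, pv_S_shift u a, ih]
    by_cases hu : u.length % 2 = 1
    · have h1 : (a :: u).length % 2 = 1 ↔ False := by simp [List.length_cons]; omega
      simp only [if_pos hu, h1, if_false, pvEO, ← pv_bxor_assoc, PySem.Int.bxor_self, pv_zero_bxor]
    · have h1 : (a :: u).length % 2 = 1 ↔ True := by simp [List.length_cons]; omega
      simp only [if_neg hu, h1, if_true, pvEO, pv_zero_bxor]

-- the outer loop over suffixes, as a recursion on the list
def pvX : List Int → Int
  | [] => 0
  | a :: u => PySem.Int.bxor (pvS 0 (a :: u)) (pvX u)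

theorem pv_outer_fold (l : List Int) :
    ∀ (t : Int),
      (List.range l.length).foldl (fun t k => PySem.Int.bxor t (pvS 0 (l.drop k))) t
      = PySem.Int.bxor t (pvX l) := by
  induction l with
  | nil => intro t; simp [pvX, PySem.Int.bxor_zero]
  | cons a u ih =>
    intro t
    rw [List.length_cons, List.range_succ_eq_map, List.foldl_cons, List.foldl_map]
    simp only [List.drop_zero, List.drop_succ_cons]
    rw [ih, pvX, pv_bxor_assoc]

theorem pv_X_char (l : List Int) : pvX l = pvSpecVal l := by
  induction l with
  | nil => rfl
  | cons a u ih =>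
    rw [pvX, pv_S_EO, ih]
    unfold pvSpecVal
    by_cases hu : u.length % 2 = 1
    · have h1 : (a :: u).length % 2 = 1 ↔ False := by simp [List.length_cons]; omega
      simp only [h1, if_false, if_pos hu, pvEO, PySem.Int.bxor_self]
    · have h1 : (a :: u).length % 2 = 1 ↔ True := by simp [List.length_cons]; omega
      simp only [h1, if_true, if_neg hu, PySem.Int.bxor_zero]

theorem pv_B_char (l : List Int) : total_xor_sum_alt l = pvSpecVal l := by
  rw [show total_xor_sum_alt l
      = (PySem.List.pyRange 0 (l.length : Int) 1).foldl
          (fun total i =>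
            ((PySem.List.pyRange i (l.length : Int) 1).foldl
              (fun (p : Int × Int) j =>
                (PySem.Int.bxor p.1 (PySem.List.pyGetD l j 0),
                 PySem.Int.bxor p.2 (PySem.Int.bxor p.1 (PySem.List.pyGetD l j 0)))) (0, total)).2) 0 from rfl]
  rw [PySem.List.foldl_congr_mem (PySem.List.pyRange 0 (l.length : Int) 1)
    (fun total i =>
      ((PySem.List.pyRange i (l.length : Int) 1).foldl
        (fun (p : Int × Int) j =>
          (PySem.Int.bxor p.1 (PySem.List.pyGetD l j 0),
           PySem.Int.bxor p.2 (PySem.Int.bxor p.1 (PySem.List.pyGetD l j 0)))) (0, total)).2)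
    (fun t i => PySem.Int.bxor t (pvS 0 (l.drop i.toNat)))
    0
    (by
      intro acc i hi
      rw [PySem.List.mem_pyRange_one] at hi
      exact pv_innerB l (l.drop i.toNat) i 0 acc hi.1 rfl)]
  rw [show PySem.List.pyRange 0 (l.length : Int) 1
        = List.map (fun k : Nat => ((k : Nat) : Int)) (List.range l.length) from by
      rw [PySem.List.pyRange_one]
      simp only [sub_zero, Int.toNat_natCast]
      exact List.map_congr_left (fun k _ => zero_add ((k : Nat) : Int))]
  rw [List.foldl_map]
  simp only [Int.toNat_natCast]
  rw [pv_outer_fold l 0, pv_zero_bxor, pv_X_char]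

-- ===== VERDICT (by name: the statement is the Claim_ definition above) =====
theorem total_xor_sum_spec : Claim_equal_total_xor_sum := by
  intro arr _
  unfold Spec_total_xor_sum
  rw [pv_A_char, pv_B_char]
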